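/- GENERATED by tools/from_farm_form.py from prooffarm-gif/accepted/DGifDecompressLine.6/Proof.lean (a worked proof of the farm's unit `DGifDecompressLine.6`,
   accepted by the verdict) — do not edit. -/
import Gif.Spec.Units.DGifDecompressLine_6
import Gif.Spec.AllSegs
import Gif.Spec.Proved.DGifDecompressLine_6_Lemmas

open X86 X86.User Asan ProgX.Base ProgX.Base.Spec Gif.Spec

set_option maxRecDepth 4000
set_option maxHeartbeats 4000000

/-- Segment 6 of `DGifDecompressLine` (106C87H … 106CFBH; dgif_lib.c:905-908): the tail of the clear arm. From `Mid` behind the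
loop that reset `Prefix[]`: the checked load of `EOFCode` and the checked store `RunningCode = EOFCode + 1`, the checked load of
`BitsPerPixel` and the checked store `RunningBits = BitsPerPixel + 1`, the checked stores `MaxCode1 = 1 << RunningBits` and
`Private->LastCode = NO_SUCH_CODE`, the local `LastCode` (`[rsp+14H]`), then the jump to the head of the main loop (106F7DH):
`Head` with the measure of `Mid` (no store touched it), which is below `m`. All six accesses are scalars of the live private
object; `LZOK` is re-established from the values stored (`dl6_lzok`). -/
theorem Gif.Spec.Proved.DGifDecompressLine_6_ok : Gif.Spec.DGifDecompressLine_6.Statement := by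
  intro Lay hLay μ hμ u₀ hcode h_load4 h_store4 H rest frames F R n m e ret v hat
  obtain ⟨hmain, h_lt, h_sp0, h_mu⟩ := hat
  obtain ⟨hbody, hloc, h_r14, h_r13, h_rbx, h_rbp, h_w1⟩ := hmain
  -- 1. THE PRELUDE (the same in every segment of this function; Gif/Spec/LzwCarry.lean §2)
  -- the entry state's facts: `he_room`, `he_top`, `he_retAddr`, …
  have he := hbody.entry
  v_entry he
  -- where gif and pv are (what `v_side` / `u_same` / `u_omega` need to place the loads and stores)
  have hgin := hbody.gif_inside
  have hpin := hbody.pv_inside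
  -- the present state, in the walker's names
  have w_rip := hbody.rip
  have c_rsp : v.reg .rsp = e.reg .rsp - 200 := hbody.rsp
  have w_eq : Mem.EqOn ProgX.Base.L.textLo ProgX.Base.L.textHi u₀.mem v.mem := ProgX.Base.conv_code_eqOn hbody.code
  have hdf : v.flags .df = false := (show abiInv _ from hbody.abi).1
  have hmx : v.mxcsr &&& 0x1F80 = 0x1F80 := (show abiInv _ from hbody.abi).2
  have hsse := ProgX.Base.sseOK_of_abiInv hbody.abi
  have w_kept : RegsKept [.rsp] v v := RegsKept.refl _ _
  -- 2. THE TWO FIELDS THE SEGMENT LOADS, as numbers: `E` = EOFCode (`[r14+10H]`), `B` = BitsPerPixel (`[r14+08H]`)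
  have hlz := hbody.lz
  obtain ⟨E, hE⟩ : ∃ E, GifFilePrivateType.EOFCode v.mem F.pv = E := ⟨_, rfl⟩
  obtain ⟨B, hB⟩ : ∃ B, GifFilePrivateType.BitsPerPixel v.mem F.pv = B := ⟨_, rfl⟩
  -- [LZ2]: `EOFCode = ClearCode + 1 ≤ 257`; [LZ1]: `BitsPerPixel ≤ 8`
  have hE257 : E ≤ 257 := by
    have k1 := hlz.clear
    have k2 := hlz.eof
    omega
  have hB8 : B ≤ 8 := by
    have k1 := hlz.bpp
    omega
  have l_eof : v.mem.readLE (v.reg .r14 + 0x10) 4 = E := by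
    rw [rd_eq_readLE v.mem _ (F.pv + 16) 4 (by u_omega)]
    have hE' := hE
    simp only [gfield] at hE'
    exact hE'
  have l_bpp : v.mem.readLE (v.reg .r14 + 0x8) 4 = B := by
    rw [rd_eq_readLE v.mem _ (F.pv + 8) 4 (by u_omega)]
    have hB' := hB
    simp only [gfield] at hB'
    exact hB'
  -- 3. THE WALK: straight code, six check calls, up to the head of the main loop (the `jmp` at 106CF6H)
  u_walk hcode [hμ.vendor]
    until [Gif.L.DGifDecompressLine.at_106f7d]
    span [ProgX.Base.L.textLo, ProgX.Base.L.textHi] side (v_side)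
  -- 4. THE CHECK GOALS: each access is a scalar field of the live private object (24936 bytes at pv)
  case check_106c8b =>
    -- l.905 the load of `Private->EOFCode` (pv + 16)
    have hun : ShadowUntouched v.mem s_106c8b.mem := by v_untouched
    have hl : LiveIn (H.liveObjs ++ rest) (DGifDecompressLine.framesIn frames e) F.pv 24936 :=
      hbody.ok.pv_live.liveIn rest _ (Nat.le_refl _) (Nat.le_refl _)
    exact hl.accSmall hbody.inv.shadow hun _ 4 (by decide) (by u_omega) (by u_omega)
  case check_106c9c =>
    -- l.905 the store of `Private->RunningCode` (pv + 20)
    have hun : ShadowUntouched v.mem s_106c9c.mem := by v_untouched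
    have hl : LiveIn (H.liveObjs ++ rest) (DGifDecompressLine.framesIn frames e) F.pv 24936 :=
      hbody.ok.pv_live.liveIn rest _ (Nat.le_refl _) (Nat.le_refl _)
    exact hl.accSmall hbody.inv.shadow hun _ 4 (by decide) (by u_omega) (by u_omega)
  case check_106ca9 =>
    -- l.906 the load of `Private->BitsPerPixel` (pv + 8)
    have hun : ShadowUntouched v.mem s_106ca9.mem := by v_untouched
    have hl : LiveIn (H.liveObjs ++ rest) (DGifDecompressLine.framesIn frames e) F.pv 24936 :=
      hbody.ok.pv_live.liveIn rest _ (Nat.le_refl _) (Nat.le_refl _)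
    exact hl.accSmall hbody.inv.shadow hun _ 4 (by decide) (by u_omega) (by u_omega)
  case check_106cba =>
    -- l.906 the store of `Private->RunningBits` (pv + 24)
    have hun : ShadowUntouched v.mem s_106cba.mem := by v_untouched
    have hl : LiveIn (H.liveObjs ++ rest) (DGifDecompressLine.framesIn frames e) F.pv 24936 :=
      hbody.ok.pv_live.liveIn rest _ (Nat.le_refl _) (Nat.le_refl _)
    exact hl.accSmall hbody.inv.shadow hun _ 4 (by decide) (by u_omega) (by u_omega)
  case check_106cd4 =>
    -- l.907 the store of `Private->MaxCode1` (pv + 28)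
    have hun : ShadowUntouched v.mem s_106cd4.mem := by v_untouched
    have hl : LiveIn (H.liveObjs ++ rest) (DGifDecompressLine.framesIn frames e) F.pv 24936 :=
      hbody.ok.pv_live.liveIn rest _ (Nat.le_refl _) (Nat.le_refl _)
    exact hl.accSmall hbody.inv.shadow hun _ 4 (by decide) (by u_omega) (by u_omega)
  case check_106ce1 =>
    -- l.908 the store of `Private->LastCode` (pv + 32)
    have hun : ShadowUntouched v.mem s_106ce1.mem := by v_untouched
    have hl : LiveIn (H.liveObjs ++ rest) (DGifDecompressLine.framesIn frames e) F.pv 24936 :=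
      hbody.ok.pv_live.liveIn rest _ (Nat.le_refl _) (Nat.le_refl _)
    exact hl.accSmall hbody.inv.shadow hun _ 4 (by decide) (by u_omega) (by u_omega)
  -- 5. THE EXIT 0x106f7d (l.888): the head of the main loop, `Head`
  -- what was stored: the return addresses of the six checks, the local `LastCode`, the four scalars `[pv + 20, pv + 36)`
  have hun : ShadowUntouched v.mem s_106cf6.mem := by v_untouched
  have hsame : Mem.SameExcept [⟨(e.reg .rsp).toNat - 208, (e.reg .rsp).toNat - 200⟩,
      ⟨(e.reg .rsp).toNat - 180, (e.reg .rsp).toNat - 176⟩, ⟨F.pv + 20, F.pv + 36⟩] v.mem s_106cf6.mem := by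
    rw [w_mem]
    u_same
  have habi : (conv u₀).inv s_106cf6 := by v_inv
  -- the two scalars that `LZOK` speaks of, read back: `RunningCode = EOFCode + 1`, `RunningBits = BitsPerPixel + 1`
  have h_rc : s_106cf6.mem.readLE (v.reg .r14 + 20) 4 =
      (BitVec.setWidth 32 (Word.ofBV (BitVec.ofNat 32 E) + 1).toBitVec).toNat := by
    rw [w_mem]
    u_read
  have h_rb : s_106cf6.mem.readLE (v.reg .r14 + 24) 4 =
      (BitVec.setWidth 32 (Word.ofBV (BitVec.ofNat 32 B) + 1).toBitVec).toNat := by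
    rw [w_mem]
    u_read
  rw [rd_eq_readLE s_106cf6.mem _ (F.pv + 20) 4 (by u_omega),
    Gif.Spec.DGifDecompressLine_6.dl6_succ_val E (by omega), ← hE] at h_rc
  rw [rd_eq_readLE s_106cf6.mem _ (F.pv + 24) 4 (by u_omega),
    Gif.Spec.DGifDecompressLine_6.dl6_succ_val B (by omega), ← hB] at h_rb
  -- `LZOK` of the exit state
  have hlz' : LZOK s_106cf6.mem F.pv := by
    refine Gif.Spec.DGifDecompressLine_6.dl6_lzok hlz (by omega) hsame ?_ ?_ ?_
    · simp only [List.forall_mem_cons, List.not_mem_nil, false_imp_iff, implies_true, and_true]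
      omega
    · simp only [gfield]
      exact h_rc
    · simp only [gfield]
      exact h_rb
  -- `Body` and `Locals` through the segment's stores
  obtain ⟨k_body, k_loc, k_mu, k_clear, k_eof⟩ :=
    hbody.carry_lz (cut' := Gif.L.DGifDecompressLine.at_106f7d) w_rip w_rsp w_eq habi hun hsame (by dl_scratch) hlz'
  -- `Head` with the measure of the entry state (below `m`): `Main` = `Body`, `Locals`, `r14`, `r13`, `rbx`, `rbp`, W1
  refine ReachVia.done ⟨mu R v.mem F.pv, h_mu, ⟨k_body, k_loc hloc, ?_, ?_, ?_, ?_, ?_⟩, k_mu⟩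
  · -- r14 = Private: not written
    rw [w_kept .r14 rfl]
    exact h_r14
  · -- r13 = Prefix: not written
    rw [w_kept .r13 rfl]
    exact h_r13
  · -- ebx = StackPtr: not written
    rw [w_kept .rbx rfl]
    exact h_rbx
  · -- ebp = i: not written
    rw [w_kept .rbp rfl]
    exact h_rbp
  · -- W1: neither `i` nor StackPtr was written
    rw [w_kept .rbx rfl, w_kept .rbp rfl]
    exact h_w1
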